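-- pv_equiv track=rewrite | github.com/yixiangchen1995/python-Sigilyph | sigilyph/core/text_process.py | replace_sil2label_old
-- ===== SOURCE A (Python) =====
-- def replace_sil2label_old(phones):
--     phones = ['sil_1' if xx == 'sil_lang' else xx for xx in phones]
--     phones = ['sil_2' if xx == 'sil_punc' else xx for xx in phones]
--     phones = ['sil_2' if xx == 'sil_end' else xx for xx in phones]
--     phones = ['sil_1' if xx == 'sil' else xx for xx in phones]
--     outphones = []
--     for ele in phones:
--         if outphones == []:
--             outphones.append(ele)
--         else:
--             if ele.split('_')[0] == 'sil' and outphones[-1].split('_')[0] == 'sil':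
--                 #outphones[-1] = 'sil_2'
--                 outphones[-1] = 'sil_1'
--             else:
--                 outphones.append(ele)
--     if outphones[-1].split('_')[0] == 'sil':
--         outphones = outphones[:-1]
--     return outphones
-- ===== SOURCE B (Python) =====
-- _SUB = {'sil_lang': 'sil_1', 'sil_punc': 'sil_2', 'sil_end': 'sil_2', 'sil': 'sil_1'}
--
--
-- def _is_sil(s):
--     return s.split('_')[0] == 'sil'
--
--
-- def replace_sil2label_old(phones):
--     # One pass with a run state: substitute via a dict, track the current run of
--     # sil tokens in `cur` = (first_of_run, run_has_two_or_more); a run is flushed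
--     # as one token when a non-sil phone ends it, so a trailing sil run is simply
--     # never emitted (no final pop needed).
--     out = []
--     cur = None
--     for x in phones:
--         x = _SUB.get(x, x)
--         if _is_sil(x):
--             cur = (cur[0], True) if cur else (x, False)
--         else:
--             if cur:
--                 out.append('sil_1' if cur[1] else cur[0])
--                 cur = None
--             out.append(x)
--     return out
-- ===== Notes on version B (the rewrite author's own statement) =====
-- stated objective: simpler
-- what changed: A's four whole-list substitution passes plus an overwrite-last collapse loop plus a final pop become one pass that substitutes via a dict and tracks the current sil run in a (first, has_two) state, flushing a run only when a non-sil phone ends it so the trailing sil run is never emitted.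
import Mathlib
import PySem

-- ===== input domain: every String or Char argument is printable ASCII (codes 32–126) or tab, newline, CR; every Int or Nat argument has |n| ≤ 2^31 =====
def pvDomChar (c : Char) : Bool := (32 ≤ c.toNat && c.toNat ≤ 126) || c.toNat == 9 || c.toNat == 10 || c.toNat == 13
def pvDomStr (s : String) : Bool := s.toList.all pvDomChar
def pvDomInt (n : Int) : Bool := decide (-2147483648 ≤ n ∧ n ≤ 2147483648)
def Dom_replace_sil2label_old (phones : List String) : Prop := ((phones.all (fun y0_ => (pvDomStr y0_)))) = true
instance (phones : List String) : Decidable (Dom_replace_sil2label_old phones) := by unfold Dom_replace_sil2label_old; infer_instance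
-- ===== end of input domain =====

-- B replaces A's four substitution passes + overwrite-last collapse loop + final pop by ONE pass
-- carrying a run state (dict substitution, current sil run as (first, has_two); a trailing run is
-- never emitted, so no final pop); objective: simpler. Return value only (no argument is mutated).

-- s.split('_')[0] == 'sil'  (this exact test appears verbatim in both Python sources)
def silHead (s : String) : Bool := ((PySem.Str.split? s "_").getD []).headD "" == "sil"

-- ===== PORT A =====
-- the body of A's collapse loop
def aStep (outphones : List String) (ele : String) : List String :=
  if outphones = [] then outphones ++ [ele]
  else if silHead ele && silHead (outphones.getLastD "") then
    outphones.dropLast ++ ["sil_1"]       -- outphones[-1] = 'sil_1'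
  else outphones ++ [ele]

def replace_sil2label_old (phones : List String) : List String :=
  let p1 := phones.map (fun xx => if xx == "sil_lang" then "sil_1" else xx)
  let p2 := p1.map (fun xx => if xx == "sil_punc" then "sil_2" else xx)
  let p3 := p2.map (fun xx => if xx == "sil_end" then "sil_2" else xx)
  let p4 := p3.map (fun xx => if xx == "sil" then "sil_1" else xx)
  let outphones := p4.foldl aStep []
  -- Python's outphones[-1] raises IndexError when outphones = [] (excluded by Pre_);
  -- getLastD "" returns "" there, and silHead "" = false, so the port returns [].
  if silHead (outphones.getLastD "") then outphones.dropLast else outphones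

-- ===== PORT B =====
def bSUB : PySem.Dict String String :=
  PySem.Dict.ofList [("sil_lang", "sil_1"), ("sil_punc", "sil_2"), ("sil_end", "sil_2"), ("sil", "sil_1")]

-- one iteration of B's for loop; state = (out, cur)
def bStep (s : List String × Option (String × Bool)) (x0 : String) :
    List String × Option (String × Bool) :=
  let x := (bSUB.get? x0).getD x0
  if silHead x then
    match s.2 with
    | some (f, _) => (s.1, some (f, true))
    | none => (s.1, some (x, false))
  else
    match s.2 with
    | some (f, two) => (s.1 ++ [if two then "sil_1" else f, x], none)
    | none => (s.1 ++ [x], none)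

def replace_sil2label_old_alt (phones : List String) : List String :=
  (phones.foldl bStep ([], none)).1

-- ===== PRECONDITION & SPEC =====
-- Pre_ excludes only the empty list, on which Python A raises IndexError (outphones[-1]).
def Pre_replace_sil2label_old (phones : List String) : Prop := phones ≠ []
instance (phones : List String) : Decidable (Pre_replace_sil2label_old phones) := by
  unfold Pre_replace_sil2label_old; infer_instance

def pvWitness_replace_sil2label_old : List String := ["sil", "a"]

def Spec_replace_sil2label_old (phones : List String) (out : List String) : Prop :=
  out = replace_sil2label_old_alt phones
instance (phones : List String) (out : List String) : Decidable (Spec_replace_sil2label_old phones out) := by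
  unfold Spec_replace_sil2label_old; infer_instance

-- ===== CLAIM (what is proved, stated in full; the proofs are below) =====
def Claim_equal_replace_sil2label_old : Prop :=
  ∀ (phones : List String), Dom_replace_sil2label_old phones →
    Pre_replace_sil2label_old phones →
    Spec_replace_sil2label_old phones (replace_sil2label_old phones)

-- ===== LEMMAS AND PROOFS =====

-- B's dict lookup, as a function
def substFn (x : String) : String := (bSUB.get? x).getD x

-- A's four substitution passes compose to B's dict lookup
lemma map4_eq_map_subst (l : List String) :
    ((((l.map (fun xx => if xx == "sil_lang" then "sil_1" else xx)).map
        (fun xx => if xx == "sil_punc" then "sil_2" else xx)).map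
        (fun xx => if xx == "sil_end" then "sil_2" else xx)).map
        (fun xx => if xx == "sil" then "sil_1" else xx)) = l.map substFn := by
  induction l with
  | nil => rfl
  | cons x l ih =>
    simp only [List.map_cons, List.cons.injEq]
    refine ⟨?_, ih⟩
    by_cases h1 : x = "sil_lang"
    · subst h1; decide
    by_cases h2 : x = "sil_punc"
    · subst h2; decide
    by_cases h3 : x = "sil_end"
    · subst h3; decide
    by_cases h4 : x = "sil"
    · subst h4; decide
    have hmk : bSUB = PySem.Dict.mk
        [("sil_lang", "sil_1"), ("sil_punc", "sil_2"), ("sil_end", "sil_2"), ("sil", "sil_1")] := by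
      decide
    have g : bSUB.get? x = none := by
      rw [hmk]
      simp [PySem.Dict.get?, beq_iff_eq,
        Ne.symm h1, Ne.symm h2, Ne.symm h3, Ne.symm h4]
    simp [substFn, g, h1, h2, h3, h4, beq_iff_eq]

-- B's abstract state, read as A's outphones list
def absState (s : List String × Option (String × Bool)) : List String :=
  match s.2 with
  | none => s.1
  | some (f, two) => s.1 ++ [if two then "sil_1" else f]

-- invariant of B's loop: out ends in a non-sil token (or is empty), and a run head is a sil token
def GoodState (s : List String × Option (String × Bool)) : Prop :=
  (s.1 = [] ∨ silHead (s.1.getLastD "") = false) ∧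
  (∀ f two, s.2 = some (f, two) → silHead f = true)

lemma silHead_sil1 : silHead "sil_1" = true := by decide

lemma step_sim (s : List String × Option (String × Bool)) (x0 : String) (hs : GoodState s) :
    aStep (absState s) (substFn x0) = absState (bStep s x0) ∧ GoodState (bStep s x0) := by
  obtain ⟨out, cur⟩ := s
  obtain ⟨hout, hcur⟩ := hs
  set e := substFn x0 with he
  have hbs : bStep (out, cur) x0 =
      (if silHead e then
        match cur with
        | some (f, _) => (out, some (f, true))
        | none => (out, some (e, false))
      else
        match cur with
        | some (f, two) => (out ++ [if two then "sil_1" else f, e], none)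
        | none => (out ++ [e], none)) := by
    cases cur <;> simp [bStep, substFn, he]
  match cur with
  | none =>
    simp only [absState] at *
    by_cases hse : silHead e = true
    · rw [hbs]
      simp only [hse, if_pos]
      refine ⟨?_, ⟨hout, by simp_all⟩⟩
      rcases hout with h | h
      · change out = [] at h
        simp [aStep, h]
      · by_cases ho : out = []
        · simp [aStep, ho]
        · change silHead (out.getLastD "") = false at h
          simp only [List.getLastD_eq_getLast?] at h
          simp [aStep, ho, h]
    · rw [hbs]
      simp only [hse]
      simp only [Bool.not_eq_true] at hse
      refine ⟨?_, ⟨?_, by simp⟩⟩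
      · by_cases ho : out = []
        · simp [aStep, ho]
        · rcases hout with h | h
          · exact absurd h ho
          · simp only [List.getLastD_eq_getLast?] at h
            simp [aStep, ho, h, hse]
      · right; simp [hse]
  | some (f, two) =>
    have hf : silHead f = true := hcur f two rfl
    have htok : silHead (if two then "sil_1" else f) = true := by
      by_cases h2 : two <;> simp [h2, hf, silHead_sil1]
    simp only [absState] at *
    by_cases hse : silHead e = true
    · rw [hbs]
      simp only [hse, if_pos]
      constructor
      · have hne : out ++ [if two then "sil_1" else f] ≠ [] := by simp
        simp [aStep, hne, hse, htok]
      · exact ⟨hout, by simp_all⟩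
    · rw [hbs]
      simp only [hse]
      simp only [Bool.not_eq_true] at hse
      constructor
      · have hne : out ++ [if two then "sil_1" else f] ≠ [] := by simp
        simp [aStep, hne, hse, htok]
      · refine ⟨?_, by simp⟩
        right
        have h2 : (out ++ [if two then "sil_1" else f, e]) = (out ++ [if two then "sil_1" else f]) ++ [e] := by
          simp
        simp only [Bool.false_eq_true, if_false, h2, List.getLastD_concat]
        exact hse

lemma foldl_sim (l : List String) (s : List String × Option (String × Bool)) (hs : GoodState s) :
    (l.map substFn).foldl aStep (absState s) = absState (l.foldl bStep s) ∧
    GoodState (l.foldl bStep s) := by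
  induction l generalizing s with
  | nil => exact ⟨rfl, hs⟩
  | cons x l ih =>
    obtain ⟨hstep, hgood⟩ := step_sim s x hs
    simpa only [List.map_cons, List.foldl_cons, hstep] using ih (bStep s x) hgood

-- ===== VERDICT (by name: the statement is the Claim_ definition above) =====
theorem replace_sil2label_old_spec : Claim_equal_replace_sil2label_old := by
  intro phones _ _
  unfold Spec_replace_sil2label_old replace_sil2label_old replace_sil2label_old_alt
  dsimp only
  rw [map4_eq_map_subst]
  have h0 : GoodState (([] : List String), (none : Option (String × Bool))) := by
    exact ⟨Or.inl rfl, by simp⟩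
  obtain ⟨hfold, hgood⟩ := foldl_sim phones ([], none) h0
  simp only [absState] at hfold
  rw [hfold]
  obtain ⟨hout, hcur⟩ := hgood
  set s' := phones.foldl bStep ([], none) with hs'
  match h : s'.2 with
  | none =>
    rcases hout with ho | ho
    · simp [ho]
    · simp only [List.getLastD_eq_getLast?] at ho
      simp [ho]
  | some (f, two) =>
    have hf : silHead f = true := hcur f two h
    have htok : silHead (if two then "sil_1" else f) = true := by
      by_cases h2 : two <;> simp [h2, hf, silHead_sil1]
    simp [htok]
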